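-- pv_equiv track=rewrite | github.com/deepuhifi/RSAT | factoring_j.py | convert_to_3cnf
-- ===== SOURCE A (Python) =====
-- def num_var(cnf):
--     vars = set()
--     for clause in cnf:
--         for literal in clause:
--             vars.add(abs(literal))
--     return len(vars)
--
-- def convert_to_3cnf(cnf):
--     good_clauses = [c for c in cnf if len(c) <= 3]
--     bad_clauses = [c for c in cnf if len(c) > 3]
--     tmp_var = num_var(cnf) + 1
--
--     def reduce_clause(clause, tmp_var):
--         cur_var = tmp_var
--         if len(clause) <= 3:
--             return [clause], tmp_var
--         tmp_clause = list(clause[2:])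
--         tmp_clause.append(cur_var)
--         tmp_clause2, tmp_var = reduce_clause(tmp_clause, tmp_var+1)
--         tmp_clause2.append( [clause[0], clause[1], -cur_var])
--         return tmp_clause2, tmp_var
--
--     for c in bad_clauses:
--         tmp_clause3, tmp_var = reduce_clause(c, tmp_var)
--         good_clauses.extend(tmp_clause3)
--
--     return good_clauses
-- ===== SOURCE B (Python) =====
-- def convert_to_3cnf(cnf):
--     tmp_var = len({abs(l) for c in cnf for l in c}) + 1
--     out = [c for c in cnf if len(c) <= 3]
--     for c in cnf:
--         if len(c) <= 3:
--             continue
--         buf = list(c)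
--         p = 0
--         emits = []
--         while len(buf) - p > 3:
--             emits.append([buf[p], buf[p + 1], -tmp_var])
--             buf.append(tmp_var)
--             p += 2
--             tmp_var += 1
--         out.append(buf[p:])
--         out.extend(reversed(emits))
--     return out
-- ===== Notes on version B (the rewrite author's own statement) =====
-- stated objective: faster
-- what changed: A splits every long clause by recursing on a fresh slice clause[2:]+[aux] per level (quadratic copying per clause); B does one iterative pointer pass over a single growing buffer per clause, collecting the emitted 3-clauses and reversing them once, with the variable count taken from one set comprehension.
import Mathlib
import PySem

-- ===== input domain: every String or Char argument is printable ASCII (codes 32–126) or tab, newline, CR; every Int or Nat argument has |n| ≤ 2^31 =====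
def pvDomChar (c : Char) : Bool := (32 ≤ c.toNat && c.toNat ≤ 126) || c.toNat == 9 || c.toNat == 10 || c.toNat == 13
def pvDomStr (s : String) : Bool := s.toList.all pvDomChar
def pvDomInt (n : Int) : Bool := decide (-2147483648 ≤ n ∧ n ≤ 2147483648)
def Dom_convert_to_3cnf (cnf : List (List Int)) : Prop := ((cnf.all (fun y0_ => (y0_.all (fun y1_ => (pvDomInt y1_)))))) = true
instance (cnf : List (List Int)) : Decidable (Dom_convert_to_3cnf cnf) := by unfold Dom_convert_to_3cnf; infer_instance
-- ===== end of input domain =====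

-- B replaces A's per-level recursion with slicing over each long clause by a single
-- iterative pointer pass per clause; same output, same auxiliary-variable numbering.

-- ===== PORT A =====
def num_var (cnf : List (List Int)) : Int :=
  ((cnf.foldl (fun vars clause =>
      clause.foldl (fun vars literal => PySem.Set.add vars |literal|) vars)
    (PySem.Set.empty : PySem.Set Int)).length : Int)

-- clause[2:] is drop 2 (nonnegative bound)
theorem pv_slice2_drop (xs : List Int) :
    PySem.List.slice xs (some 2) none = xs.drop 2 := by
  rw [show (2 : Int) = ((2 : Nat) : Int) by norm_num, PySem.List.slice_from_natCast]

-- length of clause[2:]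
theorem pv_slice2_len (xs : List Int) :
    (PySem.List.slice xs (some 2) none).length = xs.length - 2 := by
  rw [pv_slice2_drop]; simp

-- clause[0], clause[1] are ported with pyGetD; both indices are in range in the branch used
def reduce_clause (clause : List Int) (tmp_var : Int) : List (List Int) × Int :=
  if clause.length ≤ 3 then ([clause], tmp_var)
  else
    let cur_var := tmp_var
    let tmp_clause := PySem.List.slice clause (some 2) none ++ [cur_var]
    let res := reduce_clause tmp_clause (tmp_var + 1)
    (res.1 ++ [[PySem.List.pyGetD clause 0 0, PySem.List.pyGetD clause 1 0, -cur_var]], res.2)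
termination_by clause.length
decreasing_by simp [pv_slice2_len]; omega

def convert_to_3cnf (cnf : List (List Int)) : List (List Int) :=
  let good_clauses := cnf.filter (fun c => c.length ≤ 3)
  let bad_clauses := cnf.filter (fun c => ¬ (c.length ≤ 3))
  let tmp_var := num_var cnf + 1
  (bad_clauses.foldl (fun (st : List (List Int) × Int) c =>
      let res := reduce_clause c st.2
      (st.1 ++ res.1, res.2))
    (good_clauses, tmp_var)).1

-- ===== PORT B =====
-- the while-loop of Source B: pointer p into the growing buffer buf; p stays a valid index
-- (p < buf.length whenever buf is read), so List.getD is exact for Python's buf[p]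
def altLoop (buf : List Int) (p : Nat) (tmp_var : Int) (emits : List (List Int)) :
    List (List Int) × List Int × Int :=
  if 3 < buf.length - p then
    altLoop (buf ++ [tmp_var]) (p + 2) (tmp_var + 1)
      (emits ++ [[buf.getD p 0, buf.getD (p + 1) 0, -tmp_var]])
  else (emits, buf.drop p, tmp_var)
termination_by buf.length - p
decreasing_by simp; omega

def convert_to_3cnf_alt (cnf : List (List Int)) : List (List Int) :=
  let tmp_var : Int :=
    ((PySem.Set.ofList (cnf.flatMap (fun c => c.map (fun l => |l|)))).length : Int) + 1
  (cnf.foldl (fun (st : List (List Int) × Int) c =>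
      if c.length ≤ 3 then st
      else
        let res := altLoop c 0 st.2 []
        (st.1 ++ (res.2.1 :: res.1.reverse), res.2.2))
    (cnf.filter (fun c => c.length ≤ 3), tmp_var)).1

-- ===== PRECONDITION & SPEC =====
def Spec_convert_to_3cnf (cnf : List (List Int)) (out : List (List Int)) : Prop := out = convert_to_3cnf_alt cnf
instance (cnf : List (List Int)) (out : List (List Int)) : Decidable (Spec_convert_to_3cnf cnf out) := by unfold Spec_convert_to_3cnf; infer_instance

-- ===== CLAIM (what is proved, stated in full; the proofs are below) =====
def Claim_equal_convert_to_3cnf : Prop := ∀ (cnf : List (List Int)), Dom_convert_to_3cnf cnf → Spec_convert_to_3cnf cnf (convert_to_3cnf cnf)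

-- ===== LEMMAS AND PROOFS =====

-- proof-side abstraction of the loop: the pointer is replaced by the remaining suffix
def loopS (rest : List Int) (t : Int) (emits : List (List Int)) :
    List (List Int) × List Int × Int :=
  if 3 < rest.length then
    loopS (rest.drop 2 ++ [t]) (t + 1) (emits ++ [[rest.getD 0 0, rest.getD 1 0, -t]])
  else (emits, rest, t)
termination_by rest.length
decreasing_by simp; omega

theorem loopS_pos (rest : List Int) (t : Int) (emits : List (List Int))
    (hc : 3 < rest.length) :
    loopS rest t emits =
      loopS (rest.drop 2 ++ [t]) (t + 1) (emits ++ [[rest.getD 0 0, rest.getD 1 0, -t]]) := by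
  rw [loopS, if_pos hc]

theorem loopS_neg (rest : List Int) (t : Int) (emits : List (List Int))
    (hc : ¬ 3 < rest.length) : loopS rest t emits = (emits, rest, t) := by
  rw [loopS, if_neg hc]

theorem altLoop_pos (buf : List Int) (p : Nat) (t : Int) (emits : List (List Int))
    (hc : 3 < buf.length - p) :
    altLoop buf p t emits =
      altLoop (buf ++ [t]) (p + 2) (t + 1)
        (emits ++ [[buf.getD p 0, buf.getD (p + 1) 0, -t]]) := by
  rw [altLoop, if_pos hc]

theorem altLoop_neg (buf : List Int) (p : Nat) (t : Int) (emits : List (List Int))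
    (hc : ¬ 3 < buf.length - p) : altLoop buf p t emits = (emits, buf.drop p, t) := by
  rw [altLoop, if_neg hc]

theorem pv_get0 (xs : List Int) : PySem.List.pyGetD xs 0 0 = xs.getD 0 0 := by
  rw [show (0 : Int) = ((0 : Nat) : Int) by norm_num, PySem.List.pyGetD_natCast]

theorem pv_get1 (xs : List Int) : PySem.List.pyGetD xs 1 0 = xs.getD 1 0 := by
  rw [show (1 : Int) = ((1 : Nat) : Int) by norm_num, PySem.List.pyGetD_natCast]

theorem reduce_pos (clause : List Int) (t : Int) (h3 : ¬ clause.length ≤ 3) :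
    reduce_clause clause t =
      ((reduce_clause (clause.drop 2 ++ [t]) (t + 1)).1 ++
        [[clause.getD 0 0, clause.getD 1 0, -t]],
       (reduce_clause (clause.drop 2 ++ [t]) (t + 1)).2) := by
  rw [reduce_clause, if_neg h3]
  simp [pv_slice2_drop, pv_get0, pv_get1]

theorem reduce_neg (clause : List Int) (t : Int) (h3 : clause.length ≤ 3) :
    reduce_clause clause t = ([clause], t) := by
  rw [reduce_clause, if_pos h3]

theorem loopS_acc (n : Nat) : ∀ (rest : List Int) (t : Int) (emits : List (List Int)),
    rest.length ≤ n →
    loopS rest t emits = (emits ++ (loopS rest t []).1, (loopS rest t []).2) := by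
  induction n with
  | zero =>
    intro rest t emits h
    have hc : ¬ 3 < rest.length := by omega
    rw [loopS_neg _ _ _ hc, loopS_neg _ _ _ hc]
    simp
  | succ n ih =>
    intro rest t emits h
    by_cases hc : 3 < rest.length
    · rw [loopS_pos _ _ _ hc, loopS_pos _ _ [] hc,
          ih _ _ (emits ++ [[rest.getD 0 0, rest.getD 1 0, -t]]) (by simp; omega),
          ih _ _ ([] ++ [[rest.getD 0 0, rest.getD 1 0, -t]]) (by simp; omega)]
      simp
    · rw [loopS_neg _ _ _ hc, loopS_neg _ _ _ hc]
      simp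

theorem altLoop_eq_loopS (n : Nat) : ∀ (buf : List Int) (p : Nat) (t : Int)
    (emits : List (List Int)), buf.length - p ≤ n → p ≤ buf.length →
    altLoop buf p t emits = loopS (buf.drop p) t emits := by
  induction n with
  | zero =>
    intro buf p t emits h hp
    rw [altLoop_neg _ _ _ _ (by omega), loopS_neg _ _ _ (by simp; omega)]
  | succ n ih =>
    intro buf p t emits h hp
    by_cases hc : 3 < buf.length - p
    · rw [altLoop_pos _ _ _ _ hc, loopS_pos _ _ _ (by simp; omega)]
      rw [ih (buf ++ [t]) (p + 2) (t + 1) _ (by simp; omega) (by simp; omega)]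
      have hdrop : (buf ++ [t]).drop (p + 2) = (buf.drop p).drop 2 ++ [t] := by
        rw [List.drop_append_of_le_length (by omega), List.drop_drop]
      have g0 : (buf.drop p).getD 0 0 = buf.getD p 0 := by
        simp [List.getD, List.getElem?_drop]
      have g1 : (buf.drop p).getD 1 0 = buf.getD (p + 1) 0 := by
        simp [List.getD, List.getElem?_drop]
      rw [hdrop, g0, g1]
    · rw [altLoop_neg _ _ _ _ hc, loopS_neg _ _ _ (by simp; omega)]

theorem reduce_eq_loopS (n : Nat) : ∀ (rest : List Int) (t : Int), rest.length ≤ n →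
    reduce_clause rest t =
      ((loopS rest t []).2.1 :: (loopS rest t []).1.reverse, (loopS rest t []).2.2) := by
  induction n with
  | zero =>
    intro rest t h
    rw [reduce_neg _ _ (by omega), loopS_neg _ _ _ (by omega)]
    rfl
  | succ n ih =>
    intro rest t h
    by_cases h3 : rest.length ≤ 3
    · rw [reduce_neg _ _ h3, loopS_neg _ _ _ (by omega)]
      rfl
    · rw [reduce_pos _ _ h3, loopS_pos _ _ [] (by omega),
          loopS_acc n _ _ _ (by simp; omega),
          ih (rest.drop 2 ++ [t]) (t + 1) (by simp; omega)]
      simp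

theorem num_var_update (f : Int → Int) (cnf : List (List Int)) :
    ∀ (s : PySem.Set Int),
      cnf.foldl (fun s c => PySem.Set.update s (c.map f)) s =
        PySem.Set.update s (cnf.flatMap (fun c => c.map f)) := by
  induction cnf with
  | nil => intro s; simp [PySem.Set.update]
  | cons c cs ih =>
    intro s
    rw [List.foldl_cons, ih, List.flatMap_cons, PySem.Set.update_append]

theorem num_var_eq (cnf : List (List Int)) :
    num_var cnf =
      ((PySem.Set.ofList (cnf.flatMap (fun c => c.map (fun l => |l|)))).length : Int) := by
  unfold num_var
  congr 1
  have hfun : (fun (vars : PySem.Set Int) (clause : List Int) =>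
        clause.foldl (fun vars literal => PySem.Set.add vars |literal|) vars) =
      (fun s c => PySem.Set.update s (c.map (fun l => |l|))) := by
    funext s c
    rw [PySem.Set.update_map_eq_foldl_add]
  rw [hfun, num_var_update,
      show (PySem.Set.empty : PySem.Set Int) = [] from rfl, PySem.Set.update_nil_left]

theorem step_eq (st : List (List Int) × Int) (c : List Int) :
    ((st.1 ++ ((altLoop c 0 st.2 []).2.1 :: (altLoop c 0 st.2 []).1.reverse),
      (altLoop c 0 st.2 []).2.2) : List (List Int) × Int) =
    (st.1 ++ (reduce_clause c st.2).1, (reduce_clause c st.2).2) := by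
  rw [altLoop_eq_loopS c.length c 0 st.2 [] (by omega) (by omega), List.drop_zero,
      reduce_eq_loopS c.length c st.2 (le_refl _)]

theorem foldl_skip (l : List (List Int)) :
    ∀ (init : List (List Int) × Int),
      l.foldl (fun (st : List (List Int) × Int) c =>
          if c.length ≤ 3 then st
          else
            let res := altLoop c 0 st.2 []
            (st.1 ++ (res.2.1 :: res.1.reverse), res.2.2)) init =
        (l.filter (fun c => ¬ (c.length ≤ 3))).foldl (fun (st : List (List Int) × Int) c =>
          let res := reduce_clause c st.2
          (st.1 ++ res.1, res.2)) init := by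
  induction l with
  | nil => intro init; simp
  | cons c cs ih =>
    intro init
    by_cases hc : c.length ≤ 3
    · rw [List.filter_cons_of_neg (by simp [hc]), List.foldl_cons, if_pos hc, ih]
    · rw [List.filter_cons_of_pos (by simp [hc]), List.foldl_cons, List.foldl_cons,
          if_neg hc]
      show cs.foldl _ ((init.1 ++ ((altLoop c 0 init.2 []).2.1 ::
          (altLoop c 0 init.2 []).1.reverse), (altLoop c 0 init.2 []).2.2) :
          List (List Int) × Int) = _
      rw [step_eq, ih]

-- ===== VERDICT (by name: the statement is the Claim_ definition above) =====
theorem convert_to_3cnf_spec : Claim_equal_convert_to_3cnf := by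
  intro cnf _
  show convert_to_3cnf cnf = convert_to_3cnf_alt cnf
  simp only [convert_to_3cnf, convert_to_3cnf_alt, foldl_skip, num_var_eq]
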